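-- pv_equiv track=rewrite | github.com/YanZisuka/ALgorithm_sTUDY | KwonGiJeong/PGS/HDC2_20220501.py | solution
-- ===== SOURCE A (Python) =====
-- def get_point(p, num):
--     point = 0
--     for cnt in range(1, num + 1):
--         if p % cnt:
--             point += (p // cnt) + 1
--         else:
--             point += (p // cnt)
--     return point
--
-- def solution(p, vs):
--
--     IDs = []
--     table = []
--     vs_list = []
--     set_vs = []
--
--     for pair in vs:
--         pair_lists = pair.split(':')
--         vs_list.append(pair_lists)
--         if not pair_lists in table:
--             table.append(pair_lists)
--         for ID in pair_lists:
--             IDs.append(ID)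
--
--     IDs = sorted(list(set(IDs)))
--
--     win_cnts = []
--     for i in range(len(table)):
--         win_cnts.append(vs_list.count(table[i]))
--
--     point_table = []
--     for win_cnt in win_cnts:
--         point_table.append(get_point(p, win_cnt))
--
--     point_scores = [0] * len(IDs)
--     for i in range(len(IDs)):
--         for j in range(len(table)):
--             if table[j][0] == IDs[i]:
--                 point_scores[i] += point_table[j]
--
--     win_scores = [0] * len(IDs)
--     for i in range(len(IDs)):
--         for j in range(len(table)):
--             if table[j][0] == IDs[i]:
--                 win_scores[i] += 1
--
--     winner_idx = 0
--     winner_point = point_scores[0]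
--     winner_win = win_scores[0]
--     if len(IDs) > 1:
--         for i in range(1, len(IDs)):
--             if winner_point < point_scores[i]:
--                 winner_idx = i
--                 winner_point = point_scores[i]
--                 winner_win = win_scores[i]
--             elif winner_point == point_scores[i]:
--                 if winner_win < win_scores[i]:
--                     winner_idx = i
--                     winner_point = point_scores[i]
--                     winner_win = win_scores[i]
--
--     answer = IDs[winner_idx]
--     return answer
-- ===== SOURCE B (Python) =====
-- def get_point(p, num):
--     # sum of ceiling divisions p/cnt for cnt = 1..num
--     return sum(-(-p // cnt) for cnt in range(1, num + 1))
--
--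
-- def solution(p, vs):
--     # One pass: count each distinct matchup and collect all IDs.
--     counts = {}
--     ids = set()
--     for pair in vs:
--         parts = pair.split(':')
--         key = tuple(parts)
--         counts[key] = counts.get(key, 0) + 1
--         ids.update(parts)
--     # Per first-listed ID: total points and number of distinct matchups won.
--     points = {}
--     wins = {}
--     for parts, cnt in counts.items():
--         first = parts[0]
--         points[first] = points.get(first, 0) + get_point(p, cnt)
--         wins[first] = wins.get(first, 0) + 1
--     # max over the sorted IDs returns the first maximum: smallest ID on ties.
--     return max(sorted(ids), key=lambda i: (points.get(i, 0), wins.get(i, 0)))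
-- ===== Notes on version B (the rewrite author's own statement) =====
-- stated objective: simpler
-- what changed: Replaces A's repeated vs_list.count scans and the two nested IDs-times-table index loops by one pass that builds a matchup counter plus per-ID points/wins dicts, a closed ceiling-division form of get_point, and a single max(sorted(ids), key=(points, wins)); Pre_ excludes only vs = [], on which A raises IndexError (B raises ValueError there).
import Mathlib
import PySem

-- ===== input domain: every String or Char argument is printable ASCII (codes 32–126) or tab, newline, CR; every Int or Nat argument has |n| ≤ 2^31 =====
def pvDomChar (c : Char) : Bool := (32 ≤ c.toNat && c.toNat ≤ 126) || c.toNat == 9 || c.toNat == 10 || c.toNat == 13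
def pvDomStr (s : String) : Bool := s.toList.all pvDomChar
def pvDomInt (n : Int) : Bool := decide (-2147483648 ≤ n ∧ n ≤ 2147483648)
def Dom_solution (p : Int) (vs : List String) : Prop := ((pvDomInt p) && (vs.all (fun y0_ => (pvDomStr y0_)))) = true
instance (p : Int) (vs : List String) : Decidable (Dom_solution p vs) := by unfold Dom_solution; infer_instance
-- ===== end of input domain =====

-- B replaces A's repeated list.count scans and nested ID×table loops by one counting pass,
-- per-ID points/wins dicts, a closed ceiling-division form of get_point, and a single
-- first-maximum scan over the sorted IDs (objective: simpler).

-- ===== PORT A =====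
def get_point (p : Int) (num : Int) : Int :=
  (PySem.List.pyRange 1 (num + 1)).foldl
    (fun point cnt =>
      if PySem.Int.mod p cnt ≠ 0 then point + (PySem.Int.floordiv p cnt + 1)
      else point + PySem.Int.floordiv p cnt) 0

def solution (p : Int) (vs : List String) : String :=
  -- first loop: build IDs, table (ordered dedup) and vs_list; the three accumulators are
  -- independent, kept as a triple.  pair.split(':') has a non-empty separator, so split?
  -- never returns none and .getD [] is exact.
  let st := vs.foldl
    (fun (s : List String × List (List String) × List (List String)) pair =>
      let pair_lists := (PySem.Str.split? pair ":").getD []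
      (s.1 ++ pair_lists,
       if pair_lists ∈ s.2.1 then s.2.1 else s.2.1 ++ [pair_lists],
       s.2.2 ++ [pair_lists]))
    ([], [], [])
  let IDs0 := st.1
  let table := st.2.1
  let vs_list := st.2.2
  let IDs := PySem.List.sorted (PySem.Set.ofList IDs0) (fun x => x) false
  let win_cnts := (PySem.List.pyRange 0 (PySem.List.len table)).foldl
    (fun acc i => acc ++ [((PySem.List.count vs_list (PySem.List.pyGetD table i [])) : Int)]) []
  let point_table := win_cnts.foldl (fun acc w => acc ++ [get_point p w]) []
  -- point_scores[i] / win_scores[i] are each written once by the nested loops, so the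
  -- [0]*len(IDs) array with in-place += is ported as a per-index computation.
  let point_scores := (PySem.List.pyRange 0 (PySem.List.len IDs)).foldl
    (fun acc i => acc ++ [
      (PySem.List.pyRange 0 (PySem.List.len table)).foldl
        (fun sc j =>
          if PySem.List.pyGetD (PySem.List.pyGetD table j []) 0 "" == PySem.List.pyGetD IDs i "" then
            sc + PySem.List.pyGetD point_table j 0
          else sc) 0]) []
  let win_scores := (PySem.List.pyRange 0 (PySem.List.len IDs)).foldl
    (fun acc i => acc ++ [
      (PySem.List.pyRange 0 (PySem.List.len table)).foldl
        (fun sc j =>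
          if PySem.List.pyGetD (PySem.List.pyGetD table j []) 0 "" == PySem.List.pyGetD IDs i "" then
            sc + 1
          else sc) (0 : Int)]) []
  -- winner loop; on vs = [] Python raises IndexError at point_scores[0] (excluded by Pre_),
  -- the port reads the pyGetD default there instead.
  let fin := (PySem.List.pyRange 1 (PySem.List.len IDs)).foldl
    (fun (w : Int × Int × Int) i =>
      if w.2.1 < PySem.List.pyGetD point_scores i 0 then
        (i, PySem.List.pyGetD point_scores i 0, PySem.List.pyGetD win_scores i 0)
      else if w.2.1 == PySem.List.pyGetD point_scores i 0 then
        (if w.2.2 < PySem.List.pyGetD win_scores i 0 then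
           (i, PySem.List.pyGetD point_scores i 0, PySem.List.pyGetD win_scores i 0)
         else w)
      else w)
    (0, PySem.List.pyGetD point_scores 0 0, PySem.List.pyGetD win_scores 0 0)
  PySem.List.pyGetD IDs fin.1 ""

-- ===== PORT B =====
def get_point_alt (p : Int) (num : Int) : Int :=
  ((PySem.List.pyRange 1 (num + 1)).map (fun cnt => -(PySem.Int.floordiv (-p) cnt))).sum

def solution_alt (p : Int) (vs : List String) : String :=
  -- one pass: counts[tuple(parts)] += 1 and ids.update(parts)
  let st := vs.foldl
    (fun (s : PySem.Dict (List String) Int × PySem.Set String) pair =>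
      let parts := (PySem.Str.split? pair ":").getD []
      (s.1.insert parts (s.1.getD parts 0 + 1), PySem.Set.update s.2 parts))
    (PySem.Dict.empty, PySem.Set.empty)
  let pw := st.1.items.foldl
    (fun (d : PySem.Dict String Int × PySem.Dict String Int) it =>
      let first := it.1.headD ""
      (d.1.insert first (d.1.getD first 0 + get_point_alt p it.2),
       d.2.insert first (d.2.getD first 0 + 1)))
    (PySem.Dict.empty, PySem.Dict.empty)
  -- max(sorted(ids), key=...); none is only hit when vs = [] (Python max raises ValueError,
  -- excluded by Pre_)
  match PySem.List.max2? (PySem.List.sorted st.2 (fun x => x) false)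
      (fun i => pw.1.getD i 0) (fun i => pw.2.getD i 0) with
  | some w => w
  | none => ""

-- ===== PRECONDITION & SPEC =====
-- Pre_ excludes only vs = [], on which Python A raises IndexError (and B's max raises ValueError).
def Pre_solution (p : Int) (vs : List String) : Prop := vs ≠ []
instance (p : Int) (vs : List String) : Decidable (Pre_solution p vs) := by unfold Pre_solution; infer_instance
def pvWitness_solution : Int × List String := (7, ["a:b", "c:a", "a:b"])
def Spec_solution (p : Int) (vs : List String) (out : String) : Prop := out = solution_alt p vs
instance (p : Int) (vs : List String) (out : String) : Decidable (Spec_solution p vs out) := by unfold Spec_solution; infer_instance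

-- ===== CLAIM (what is proved, stated in full; the proofs are below) =====
def Claim_equal_solution : Prop := ∀ (p : Int) (vs : List String), Dom_solution p vs → Pre_solution p vs → Spec_solution p vs (solution p vs)

-- ===== LEMMAS AND PROOFS =====

-- the split both ports perform
def pvF (s : String) : List String := (PySem.Str.split? s ":").getD []
-- canonical intermediate data: deduplicated table, sorted ID list, the two score keys
def pvTbl (vs : List String) : List (List String) := PySem.Set.ofList (vs.map pvF)
def pvIds (vs : List String) : List String :=
  PySem.List.sorted (PySem.Set.ofList (vs.flatMap pvF)) (fun x => x) false
def pvP (p : Int) (vs : List String) : String → Int := fun id =>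
  (((pvTbl vs).filter (fun t => t.headD "" == id)).map
    (fun t => get_point_alt p ((List.count t (vs.map pvF) : Nat) : Int))).sum
def pvW (vs : List String) : String → Int := fun id =>
  ((((pvTbl vs).filter (fun t => t.headD "" == id)).length : Nat) : Int)
-- the scalar step of Python's max(..., key=(P, W)) (first maximum)
def pvStep2 (P W : String → Int) (m x : String) : String :=
  if (decide (P m < P x) || !decide (P x < P m) && decide (W m < W x)) = true then x else m
-- A's winner-loop step, named so the loop lemmas below can state it
def pvStepA (P W : String → Int) (xs : List String) (w : Int × Int × Int) (i : Int) :
    Int × Int × Int :=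
  if w.2.1 < PySem.List.pyGetD (xs.map P) i 0 then
    (i, PySem.List.pyGetD (xs.map P) i 0, PySem.List.pyGetD (xs.map W) i 0)
  else if w.2.1 == PySem.List.pyGetD (xs.map P) i 0 then
    (if w.2.2 < PySem.List.pyGetD (xs.map W) i 0 then
       (i, PySem.List.pyGetD (xs.map P) i 0, PySem.List.pyGetD (xs.map W) i 0)
     else w)
  else w

theorem pvStepA_apply (P W : String → Int) (xs : List String) (ka pk wk i : Int) :
    pvStepA P W xs (ka, pk, wk) i
      = if pk < PySem.List.pyGetD (xs.map P) i 0 then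
          (i, PySem.List.pyGetD (xs.map P) i 0, PySem.List.pyGetD (xs.map W) i 0)
        else if pk == PySem.List.pyGetD (xs.map P) i 0 then
          (if wk < PySem.List.pyGetD (xs.map W) i 0 then
             (i, PySem.List.pyGetD (xs.map P) i 0, PySem.List.pyGetD (xs.map W) i 0)
           else (ka, pk, wk))
        else (ka, pk, wk) := rfl

theorem pvStep2_eq (P W : String → Int) (m x : String) :
    pvStep2 P W m x = if P m < P x ∨ (P m = P x ∧ W m < W x) then x else m := by
  unfold pvStep2
  by_cases h : P m < P x ∨ (P m = P x ∧ W m < W x)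
  · rw [if_pos h, if_pos]
    simp only [Bool.or_eq_true, Bool.and_eq_true, Bool.not_eq_true', decide_eq_true_eq,
      decide_eq_false_iff_not]
    omega
  · rw [if_neg h, if_neg]
    simp only [Bool.or_eq_true, Bool.and_eq_true, Bool.not_eq_true', decide_eq_true_eq,
      decide_eq_false_iff_not]
    omega

theorem get_point_eq (p num : Int) : get_point p num = get_point_alt p num := by
  unfold get_point get_point_alt
  rw [PySem.List.foldl_congr_mem _ _
      (fun point cnt => point +
        (if PySem.Int.mod p cnt ≠ 0 then PySem.Int.floordiv p cnt + 1
         else PySem.Int.floordiv p cnt)) _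
      (by
        intro acc x _
        show (if PySem.Int.mod p x ≠ 0 then acc + (PySem.Int.floordiv p x + 1)
              else acc + PySem.Int.floordiv p x)
            = acc + (if PySem.Int.mod p x ≠ 0 then PySem.Int.floordiv p x + 1
              else PySem.Int.floordiv p x)
        split_ifs <;> rfl),
    PySem.List.foldl_add]
  have hmem : ∀ c ∈ PySem.List.pyRange 1 (num + 1),
      (if PySem.Int.mod p c ≠ 0 then PySem.Int.floordiv p c + 1 else PySem.Int.floordiv p c)
        = -(PySem.Int.floordiv (-p) c) := by
    intro c hc
    have hb : (0 : Int) < c := by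
      have := (PySem.List.mem_pyRange_one.mp hc).1; omega
    have hdm := PySem.Int.floordiv_mul_add_mod p c
    have hm0 := PySem.Int.mod_nonneg p hb
    have hml := PySem.Int.mod_lt p hb
    rw [eq_comm, PySem.Int.neg_floordiv_neg_eq_iff_of_pos hb]
    by_cases hz : PySem.Int.mod p c = 0
    · rw [if_neg (by simp [hz])]
      constructor <;> nlinarith
    · rw [if_pos hz]
      have hr : 0 < PySem.Int.mod p c := lt_of_le_of_ne hm0 (Ne.symm hz)
      constructor <;> nlinarith
  rw [List.map_congr_left hmem]
  ring

theorem pvHead {α : Type} (t : List α) (d : α) : PySem.List.pyGetD t 0 d = t.headD d := by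
  cases t <;> simp [PySem.List.pyGetD, PySem.List.pyGet?, PySem.List.pyIdx?]

theorem pvGetDMap {α : Type} (T : List α) (h : α → Int) (j : Int) (dflt : α)
    (h0 : 0 ≤ j) (hl : j < (T.length : Int)) :
    PySem.List.pyGetD (T.map h) j 0 = h (PySem.List.pyGetD T j dflt) := by
  obtain ⟨n, rfl⟩ := Int.eq_ofNat_of_zero_le h0
  have hn : n < T.length := by exact_mod_cast hl
  rw [PySem.List.pyGetD_natCast, PySem.List.pyGetD_natCast]
  simp [List.getD, hn]

theorem pvSetAdd (s : List (List String)) (x : List String) :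
    (if x ∈ s then s else s ++ [x]) = PySem.Set.add s x := by
  by_cases h : x ∈ s <;> simp [PySem.Set.add, h]

theorem pvDictAccum {α : Type} (g : α → String) (v : α → Int) (l : List α)
    (d : PySem.Dict String Int) (c : String) :
    (l.foldl (fun d x => d.insert (g x) (d.getD (g x) 0 + v x)) d).getD c 0
      = d.getD c 0 + ((l.filter (fun x => g x == c)).map v).sum := by
  induction l generalizing d with
  | nil => simp
  | cons x rest ih =>
    simp only [List.foldl_cons, List.filter_cons, ih]
    by_cases h : g x = c
    · subst h; simp [PySem.Dict.getD_insert_self]; ring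
    · simp [PySem.Dict.getD_insert, h, Ne.symm h]

theorem pvMax2 (P W : String → Int) (t : List String) (x : String) :
    PySem.List.max2? (x :: t) P W = some (t.foldl (pvStep2 P W) x) := by
  rw [PySem.List.max2?]
  simp only [List.foldl_cons]
  induction t generalizing x with
  | nil => rfl
  | cons y t ih =>
    simp only [List.foldl_cons]
    rw [show (if (decide (P x < P y) || !decide (P y < P x) && decide (W x < W y)) = true
           then some y else some x) = some (pvStep2 P W x y) from by
        by_cases hc : (decide (P x < P y) || !decide (P y < P x) && decide (W x < W y)) = true <;>
          simp [pvStep2, hc]]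
    exact ih (pvStep2 P W x y)

theorem pvWinnerAux (xs : List String) (P W : String → Int) :
    ∀ (m a k : Nat), a + m = xs.length → k < xs.length →
    ∃ j : Nat, j < xs.length ∧
      (PySem.List.pyRange ((a : Nat) : Int) (PySem.List.len xs)).foldl (pvStepA P W xs)
        (((k : Nat) : Int), P (xs.getD k ""), W (xs.getD k ""))
        = (((j : Nat) : Int), P (xs.getD j ""), W (xs.getD j "")) ∧
      (xs.drop a).foldl (pvStep2 P W) (xs.getD k "") = xs.getD j "" := by
  intro m
  induction m with
  | zero =>
    intro a k ha hk
    refine ⟨k, hk, ?_, ?_⟩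
    · have hnil : PySem.List.pyRange ((a : Nat) : Int) (PySem.List.len xs) = [] := by
        rw [PySem.List.len, PySem.List.pyRange_of_pos _ _ (by norm_num : (0:Int) < 1)]
        rw [if_neg (by omega)]
        simp
      rw [hnil]
      rfl
    · rw [List.drop_eq_nil_of_le (by omega)]
      rfl
  | succ n ih =>
    intro a k ha hk
    have halt : a < xs.length := by omega
    have hlt : (((a : Nat)) : Int) < PySem.List.len xs := by rw [PySem.List.len]; omega
    rw [PySem.List.pyRange_one_cons hlt, List.foldl_cons]
    rw [List.drop_eq_getElem_cons halt, List.foldl_cons]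
    have hga : xs[a] = xs.getD a "" := (List.getD_eq_getElem xs "" halt).symm
    have hPa : PySem.List.pyGetD (xs.map P) ((a : Nat) : Int) 0 = P (xs.getD a "") := by
      rw [pvGetDMap xs P _ "" (Int.natCast_nonneg a) (by exact_mod_cast halt),
        PySem.List.pyGetD_natCast]
    have hWa : PySem.List.pyGetD (xs.map W) ((a : Nat) : Int) 0 = W (xs.getD a "") := by
      rw [pvGetDMap xs W _ "" (Int.natCast_nonneg a) (by exact_mod_cast halt),
        PySem.List.pyGetD_natCast]
    have hcast : (((a : Nat) : Int) + 1) = (((a + 1 : Nat)) : Int) := by push_cast; ring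
    rw [hga, pvStepA_apply, hPa, hWa, pvStep2_eq]
    by_cases h1 : P (xs.getD k "") < P (xs.getD a "")
    · rw [if_pos h1, if_pos (Or.inl h1), hcast]
      exact ih (a + 1) a (by omega) halt
    · rw [if_neg h1]
      by_cases h2 : P (xs.getD k "") = P (xs.getD a "")
      · rw [if_pos (by simpa using h2)]
        by_cases h3 : W (xs.getD k "") < W (xs.getD a "")
        · rw [if_pos h3, if_pos (Or.inr ⟨h2, h3⟩), hcast]
          exact ih (a + 1) a (by omega) halt
        · rw [if_neg h3, if_neg (by rintro (h | ⟨_, h⟩); exacts [h1 h, h3 h]), hcast]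
          exact ih (a + 1) k (by omega) hk
      · rw [if_neg (by simpa using h2), if_neg (by rintro (h | ⟨h, _⟩); exacts [h1 h, h2 h]),
          hcast]
        exact ih (a + 1) k (by omega) hk

theorem pvWinner (xs : List String) (P W : String → Int) :
    PySem.List.pyGetD xs
      ((PySem.List.pyRange 1 (PySem.List.len xs)).foldl (pvStepA P W xs)
        (0, PySem.List.pyGetD (xs.map P) 0 0, PySem.List.pyGetD (xs.map W) 0 0)).1 ""
      = (PySem.List.max2? xs P W).getD "" := by
  cases xs with
  | nil =>
    simp [PySem.List.max2?, PySem.List.len, PySem.List.pyRange, PySem.List.pyGetD,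
      PySem.List.pyGet?, PySem.List.pyIdx?]
  | cons x t =>
    obtain ⟨j, hj, hfold, hscan⟩ := pvWinnerAux (x :: t) P W t.length 1 0 (by rw [List.length_cons]; omega) (by simp)
    simp only [Nat.cast_one, Nat.cast_zero, List.getD_cons_zero, List.drop_succ_cons,
      List.drop_zero] at hfold hscan
    have h0P : PySem.List.pyGetD ((x :: t).map P) 0 0 = P x := by
      simp only [List.map_cons]
      rw [pvHead]
      rfl
    have h0W : PySem.List.pyGetD ((x :: t).map W) 0 0 = W x := by
      simp only [List.map_cons]
      rw [pvHead]
      rfl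
    rw [h0P, h0W, hfold, pvMax2]
    simp only [Option.getD_some]
    rw [PySem.List.pyGetD_natCast]
    exact hscan.symm

theorem solutionA (p : Int) (vs : List String) :
    solution p vs = (PySem.List.max2? (pvIds vs) (pvP p vs) (pvW vs)).getD "" := by
  have hst : vs.foldl
      (fun (s : List String × List (List String) × List (List String)) pair =>
        (s.1 ++ (PySem.Str.split? pair ":").getD [],
         if (PySem.Str.split? pair ":").getD [] ∈ s.2.1 then s.2.1
         else s.2.1 ++ [(PySem.Str.split? pair ":").getD []],
         s.2.2 ++ [(PySem.Str.split? pair ":").getD []]))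
      ([], [], [])
      = (vs.flatMap pvF, pvTbl vs, vs.map pvF) := by
    rw [PySem.List.foldl_prod_mk
        (f := fun (s : List String) pair => s ++ (PySem.Str.split? pair ":").getD [])
        (g := fun (s : List (List String) × List (List String)) pair =>
          (if (PySem.Str.split? pair ":").getD [] ∈ s.1 then s.1
           else s.1 ++ [(PySem.Str.split? pair ":").getD []],
           s.2 ++ [(PySem.Str.split? pair ":").getD []])),
      PySem.List.foldl_prod_mk
        (f := fun (s : List (List String)) pair =>
          if (PySem.Str.split? pair ":").getD [] ∈ s then s
          else s ++ [(PySem.Str.split? pair ":").getD []])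
        (g := fun (s : List (List String)) pair => s ++ [(PySem.Str.split? pair ":").getD []])]
    refine congrArg₂ Prod.mk ?_ (congrArg₂ Prod.mk ?_ ?_)
    · rw [PySem.List.foldl_append_eq_flatMap, List.nil_append]
      rfl
    · rw [PySem.List.foldl_congr_mem vs
          (fun (s : List (List String)) pair =>
            if (PySem.Str.split? pair ":").getD [] ∈ s then s
            else s ++ [(PySem.Str.split? pair ":").getD []])
          (fun (acc : List (List String)) pair => PySem.Set.add acc (pvF pair)) []
          (fun acc x _ => pvSetAdd acc (pvF x))]
      unfold pvTbl
      rw [PySem.Set.ofList_eq_foldl, List.foldl_map]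
    · rw [PySem.List.foldl_append_singleton_eq_map, List.nil_append]
      rfl
  have hstA : (vs.foldl
      (fun (s : List String × List (List String) × List (List String)) pair =>
        (s.1 ++ (PySem.Str.split? pair ":").getD [],
         if (PySem.Str.split? pair ":").getD [] ∈ s.2.1 then s.2.1
         else s.2.1 ++ [(PySem.Str.split? pair ":").getD []],
         s.2.2 ++ [(PySem.Str.split? pair ":").getD []]))
      ([], [], [])).1 = vs.flatMap pvF := by rw [hst]
  have hstB : (vs.foldl
      (fun (s : List String × List (List String) × List (List String)) pair =>
        (s.1 ++ (PySem.Str.split? pair ":").getD [],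
         if (PySem.Str.split? pair ":").getD [] ∈ s.2.1 then s.2.1
         else s.2.1 ++ [(PySem.Str.split? pair ":").getD []],
         s.2.2 ++ [(PySem.Str.split? pair ":").getD []]))
      ([], [], [])).2.1 = pvTbl vs := by rw [hst]
  have hstC : (vs.foldl
      (fun (s : List String × List (List String) × List (List String)) pair =>
        (s.1 ++ (PySem.Str.split? pair ":").getD [],
         if (PySem.Str.split? pair ":").getD [] ∈ s.2.1 then s.2.1
         else s.2.1 ++ [(PySem.Str.split? pair ":").getD []],
         s.2.2 ++ [(PySem.Str.split? pair ":").getD []]))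
      ([], [], [])).2.2 = vs.map pvF := by rw [hst]
  have hIfold : PySem.List.sorted (PySem.Set.ofList (vs.flatMap pvF)) (fun x => x) false
      = pvIds vs := rfl
  have hpt : ((PySem.List.pyRange 0 (PySem.List.len (pvTbl vs))).foldl
        (fun acc i => acc ++
          [((PySem.List.count (vs.map pvF) (PySem.List.pyGetD (pvTbl vs) i [])) : Int)]) []).foldl
      (fun acc w => acc ++ [get_point p w]) []
      = (pvTbl vs).map (fun t => get_point_alt p ((List.count t (vs.map pvF) : Nat) : Int)) := by
    rw [PySem.List.foldl_pyRange_pyGetD (pvTbl vs) []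
        (fun acc t => acc ++ [((PySem.List.count (vs.map pvF) t) : Int)]) [] (le_refl 0)]
    simp only [Int.toNat_zero, List.drop_zero]
    rw [PySem.List.foldl_append_singleton_eq_map, List.nil_append,
      PySem.List.foldl_append_singleton_eq_map, List.nil_append, List.map_map]
    simp only [Function.comp_def, PySem.List.count_eq, get_point_eq]
  have hPinner : ∀ id : String, (PySem.List.pyRange 0 (PySem.List.len (pvTbl vs))).foldl
      (fun sc j =>
        if PySem.List.pyGetD (PySem.List.pyGetD (pvTbl vs) j []) 0 "" == id then
          sc + PySem.List.pyGetD
            ((pvTbl vs).map (fun t => get_point_alt p ((List.count t (vs.map pvF) : Nat) : Int)))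
            j 0
        else sc) 0 = pvP p vs id := by
    intro id
    rw [PySem.List.foldl_congr_mem _ _
        (fun sc j =>
          if PySem.List.pyGetD (PySem.List.pyGetD (pvTbl vs) j []) 0 "" == id then
            sc + (fun t => get_point_alt p ((List.count t (vs.map pvF) : Nat) : Int))
              (PySem.List.pyGetD (pvTbl vs) j [])
          else sc) _ ?_]
    · rw [PySem.List.foldl_pyRange_pyGetD (pvTbl vs) []
          (fun sc t =>
            if PySem.List.pyGetD t 0 "" == id then
              sc + (fun t => get_point_alt p ((List.count t (vs.map pvF) : Nat) : Int)) t
            else sc) 0 (le_refl 0)]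
      simp only [Int.toNat_zero, List.drop_zero]
      rw [PySem.List.foldl_if_eq_foldl_filter
          (fun t => PySem.List.pyGetD t 0 "" == id)
          (fun sc t =>
            sc + (fun t => get_point_alt p ((List.count t (vs.map pvF) : Nat) : Int)) t),
        PySem.List.foldl_add]
      simp only [pvHead, zero_add, pvP]
    · intro acc j hj
      obtain ⟨hj0, hj1⟩ := PySem.List.mem_pyRange_one.mp hj
      rw [pvGetDMap (pvTbl vs) _ j [] hj0 (by rwa [PySem.List.len] at hj1)]
  have hWinner : ∀ id : String, (PySem.List.pyRange 0 (PySem.List.len (pvTbl vs))).foldl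
      (fun sc j =>
        if PySem.List.pyGetD (PySem.List.pyGetD (pvTbl vs) j []) 0 "" == id then sc + 1
        else sc) (0 : Int) = pvW vs id := by
    intro id
    rw [PySem.List.foldl_pyRange_pyGetD (pvTbl vs) []
        (fun sc t => if PySem.List.pyGetD t 0 "" == id then sc + 1 else sc) (0 : Int) (le_refl 0)]
    simp only [Int.toNat_zero, List.drop_zero]
    rw [PySem.List.foldl_if_add_one (fun t => PySem.List.pyGetD t 0 "" == id)]
    simp only [pvHead, zero_add, pvW, List.countP_eq_length_filter]
  have hpsOuter : (PySem.List.pyRange 0 (PySem.List.len (pvIds vs))).foldl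
      (fun acc i => acc ++ [
        (PySem.List.pyRange 0 (PySem.List.len (pvTbl vs))).foldl
          (fun sc j =>
            if PySem.List.pyGetD (PySem.List.pyGetD (pvTbl vs) j []) 0 ""
                == PySem.List.pyGetD (pvIds vs) i "" then
              sc + PySem.List.pyGetD
                ((pvTbl vs).map
                  (fun t => get_point_alt p ((List.count t (vs.map pvF) : Nat) : Int))) j 0
            else sc) 0]) []
      = (pvIds vs).map (pvP p vs) := by
    rw [PySem.List.foldl_pyRange_pyGetD (pvIds vs) ""
        (fun acc id => acc ++ [
          (PySem.List.pyRange 0 (PySem.List.len (pvTbl vs))).foldl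
            (fun sc j =>
              if PySem.List.pyGetD (PySem.List.pyGetD (pvTbl vs) j []) 0 "" == id then
                sc + PySem.List.pyGetD
                  ((pvTbl vs).map
                    (fun t => get_point_alt p ((List.count t (vs.map pvF) : Nat) : Int))) j 0
              else sc) 0]) [] (le_refl 0)]
    simp only [Int.toNat_zero, List.drop_zero]
    rw [PySem.List.foldl_append_singleton_eq_map, List.nil_append]
    exact List.map_congr_left (fun id _ => hPinner id)
  have hwsOuter : (PySem.List.pyRange 0 (PySem.List.len (pvIds vs))).foldl
      (fun acc i => acc ++ [
        (PySem.List.pyRange 0 (PySem.List.len (pvTbl vs))).foldl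
          (fun sc j =>
            if PySem.List.pyGetD (PySem.List.pyGetD (pvTbl vs) j []) 0 ""
                == PySem.List.pyGetD (pvIds vs) i "" then
              sc + 1
            else sc) (0 : Int)]) []
      = (pvIds vs).map (pvW vs) := by
    rw [PySem.List.foldl_pyRange_pyGetD (pvIds vs) ""
        (fun acc id => acc ++ [
          (PySem.List.pyRange 0 (PySem.List.len (pvTbl vs))).foldl
            (fun sc j =>
              if PySem.List.pyGetD (PySem.List.pyGetD (pvTbl vs) j []) 0 "" == id then sc + 1
              else sc) (0 : Int)]) [] (le_refl 0)]
    simp only [Int.toNat_zero, List.drop_zero]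
    rw [PySem.List.foldl_append_singleton_eq_map, List.nil_append]
    exact List.map_congr_left (fun id _ => hWinner id)
  simp only [solution]
  rw [hstA, hstB, hstC, hIfold, hpt, hpsOuter, hwsOuter]
  exact pvWinner (pvIds vs) (pvP p vs) (pvW vs)

theorem solutionB (p : Int) (vs : List String) :
    solution_alt p vs = (PySem.List.max2? (pvIds vs) (pvP p vs) (pvW vs)).getD "" := by
  have hcounts : (vs.foldl
      (fun (s : PySem.Dict (List String) Int × PySem.Set String) pair =>
        (s.1.insert ((PySem.Str.split? pair ":").getD [])
           (s.1.getD ((PySem.Str.split? pair ":").getD []) 0 + 1),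
         PySem.Set.update s.2 ((PySem.Str.split? pair ":").getD [])))
      (PySem.Dict.empty, PySem.Set.empty)).1 = PySem.Dict.counter (vs.map pvF) := by
    rw [PySem.List.foldl_prod_mk
        (f := fun (d : PySem.Dict (List String) Int) pair =>
          d.insert ((PySem.Str.split? pair ":").getD [])
            (d.getD ((PySem.Str.split? pair ":").getD []) 0 + 1))
        (g := fun (s : PySem.Set String) pair =>
          PySem.Set.update s ((PySem.Str.split? pair ":").getD []))]
    show vs.foldl
        (fun (d : PySem.Dict (List String) Int) pair =>
          d.insert ((PySem.Str.split? pair ":").getD [])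
            (d.getD ((PySem.Str.split? pair ":").getD []) 0 + 1)) PySem.Dict.empty
      = PySem.Dict.counter (vs.map pvF)
    rw [← PySem.Dict.foldl_insert_getD_add_one_eq_counter, List.foldl_map]
    rfl
  have hids : (vs.foldl
      (fun (s : PySem.Dict (List String) Int × PySem.Set String) pair =>
        (s.1.insert ((PySem.Str.split? pair ":").getD [])
           (s.1.getD ((PySem.Str.split? pair ":").getD []) 0 + 1),
         PySem.Set.update s.2 ((PySem.Str.split? pair ":").getD [])))
      (PySem.Dict.empty, PySem.Set.empty)).2 = PySem.Set.ofList (vs.flatMap pvF) := by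
    rw [PySem.List.foldl_prod_mk
        (f := fun (d : PySem.Dict (List String) Int) pair =>
          d.insert ((PySem.Str.split? pair ":").getD [])
            (d.getD ((PySem.Str.split? pair ":").getD []) 0 + 1))
        (g := fun (s : PySem.Set String) pair =>
          PySem.Set.update s ((PySem.Str.split? pair ":").getD []))]
    show vs.foldl
        (fun (s : PySem.Set String) pair =>
          PySem.Set.update s ((PySem.Str.split? pair ":").getD [])) PySem.Set.empty
      = PySem.Set.ofList (vs.flatMap pvF)
    simp only [PySem.Set.update, PySem.Set.ofList]
    rw [List.foldl_flatMap]
    rfl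
  simp only [solution_alt]
  rw [hcounts, hids]
  rw [PySem.List.foldl_prod_mk
      (f := fun (d : PySem.Dict String Int) (it : List String × Int) =>
        d.insert (it.1.headD "") (d.getD (it.1.headD "") 0 + get_point_alt p it.2))
      (g := fun (d : PySem.Dict String Int) (it : List String × Int) =>
        d.insert (it.1.headD "") (d.getD (it.1.headD "") 0 + 1))]
  have hPfun : (fun i => ((PySem.Dict.counter (vs.map pvF)).items.foldl
        (fun (d : PySem.Dict String Int) (it : List String × Int) =>
          d.insert (it.1.headD "") (d.getD (it.1.headD "") 0 + get_point_alt p it.2))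
        PySem.Dict.empty).getD i 0) = pvP p vs := by
    funext id
    rw [pvDictAccum (fun (it : List String × Int) => it.1.headD "")
        (fun (it : List String × Int) => get_point_alt p it.2)]
    rw [PySem.Dict.items_counter, PySem.Dict.getD_empty, List.filter_map, List.map_map]
    simp [Function.comp_def, pvP, pvTbl]
  have hWfun : (fun i => ((PySem.Dict.counter (vs.map pvF)).items.foldl
        (fun (d : PySem.Dict String Int) (it : List String × Int) =>
          d.insert (it.1.headD "") (d.getD (it.1.headD "") 0 + 1))
        PySem.Dict.empty).getD i 0) = pvW vs := by
    funext id
    rw [pvDictAccum (fun (it : List String × Int) => it.1.headD "")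
        (fun (_ : List String × Int) => (1 : Int))]
    rw [PySem.Dict.items_counter, PySem.Dict.getD_empty, List.filter_map, List.map_map]
    simp only [Function.comp_def]
    rw [PySem.List.sum_map_const_int]
    simp [pvW, pvTbl]
  rw [hPfun, hWfun]
  have hids2 : PySem.List.sorted (PySem.Set.ofList (vs.flatMap pvF)) (fun x => x) false
      = pvIds vs := rfl
  rw [hids2]
  cases hmax : PySem.List.max2? (pvIds vs) (pvP p vs) (pvW vs) <;> simp

-- ===== VERDICT (by name: the statement is the Claim_ definition above) =====
theorem solution_spec : Claim_equal_solution := by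
  intro p vs _ _
  unfold Spec_solution
  rw [solutionA, solutionB]
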